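-- pv_equiv track=rewrite | github.com/luisfeliTEC-0603/GENETIC-KINGDOM | Saves/origin.py | create_spawn_points
-- ===== SOURCE A (Python) =====
-- from typing import List, Tuple
--
-- PATH = ' '
--
-- def create_spawn_points(grid: List[List[str]]) -> List[List[str]]:
--     """Replace some perimeter walls with spawn points ('S').
--
--     Args:
--         grid: The map grid to modify
--
--     Returns:
--         The modified grid with spawn points added
--     """
--     height = len(grid)
--     width = len(grid[0]) if height > 0 else 0
--
--     # Top and bottom edges
--     for x in range(width):
--         if grid[0][x] == PATH:
--             grid[0][x] = 'S'
--         if grid[height-1][x] == PATH: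
--             grid[height-1][x] = 'S'
--
--     # Left and right edges (skip corners already done above)
--     for y in range(1, height-1):
--         if grid[y][0] == PATH:
--             grid[y][0] = 'S'
--         if grid[y][width-1] == PATH:
--             grid[y][width-1] = 'S'
--
--     return grid
-- ===== SOURCE B (Python) =====
-- PATH = ' '
--
-- def create_spawn_points(grid):
--     """Mark perimeter PATH cells as spawn points with a single uniform scan."""
--     height = len(grid)
--     width = len(grid[0]) if height > 0 else 0
--     for y in range(height):
--         for x in range(width):
--             if (y == 0 or y == height - 1 or x == 0 or x == width - 1) \
--                     and grid[y][x] == PATH: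
--                 grid[y][x] = 'S'
--     return grid
-- ===== Notes on version B (the rewrite author's own statement) =====
-- stated objective: simpler
-- what changed: Replaces A's two edge-specific passes (top/bottom loop, then a side loop skipping corners) by one uniform nested scan over all cells with a single perimeter predicate.
-- intended difference: On grids whose first row is empty but that have at least 3 rows, A's side loop still runs and, through grid[y][0] and Python's negative index grid[y][-1], turns ' ' cells at either end of a nonempty middle row into 'S' although the grid's declared width is 0, while B reads width 0 as nothing to mark and returns the grid unchanged, which is the intended meaning of width. — e.g. on create_spawn_points([[], [" "], []]): A returns [[], ["S"], []], B returns [[], [" "], []]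
import Mathlib
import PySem

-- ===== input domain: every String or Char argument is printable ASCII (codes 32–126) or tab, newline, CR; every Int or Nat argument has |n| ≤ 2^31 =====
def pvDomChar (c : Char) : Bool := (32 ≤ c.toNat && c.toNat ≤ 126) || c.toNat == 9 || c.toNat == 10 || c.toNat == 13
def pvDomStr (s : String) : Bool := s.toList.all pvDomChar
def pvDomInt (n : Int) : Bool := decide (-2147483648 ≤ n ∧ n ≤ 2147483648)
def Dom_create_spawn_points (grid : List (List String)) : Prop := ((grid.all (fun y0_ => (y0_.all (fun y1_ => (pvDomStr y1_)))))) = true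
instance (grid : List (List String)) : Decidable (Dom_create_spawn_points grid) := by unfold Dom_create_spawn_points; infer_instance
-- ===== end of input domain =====

-- B replaces A's two edge-specific passes by one uniform perimeter-predicate scan (objective: simpler).
-- A mutates its argument in place in Python; B performs the same in-place mutation, and the theorems are about the returned grid.

-- ===== PORT A =====
-- grid[y][x] (Python ints, possibly negative), totalised with defaults; under Pre_ every index A reads is in range
def pvGetA (g : List (List String)) (y x : Int) : String :=
  PySem.List.pyGetD (PySem.List.pyGetD g y []) x ""
-- grid[y][x] = v
def pvSetA (g : List (List String)) (y x : Int) (v : String) : List (List String) :=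
  PySem.List.pySetD g y (PySem.List.pySetD (PySem.List.pyGetD g y []) x v)

def create_spawn_points (grid : List (List String)) : List (List String) :=
  let height : Int := grid.length
  let width : Int := if height > 0 then ((grid.headD []).length : Int) else 0
  -- Top and bottom edges
  let g1 := (PySem.List.pyRange 0 width 1).foldl (fun g x =>
    let g' := if pvGetA g 0 x = " " then pvSetA g 0 x "S" else g
    if pvGetA g' (height - 1) x = " " then pvSetA g' (height - 1) x "S" else g') grid
  -- Left and right edges (skip corners already done above)
  (PySem.List.pyRange 1 (height - 1) 1).foldl (fun g y =>
    let g' := if pvGetA g y 0 = " " then pvSetA g y 0 "S" else g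
    if pvGetA g' y (width - 1) = " " then pvSetA g' y (width - 1) "S" else g') g1

-- ===== PORT B =====
-- grid[y][x] for the always-nonnegative indices B uses
def pvCell (g : List (List String)) (y x : Nat) : String := (g.getD y []).getD x ""
def pvPut (g : List (List String)) (y x : Nat) (v : String) : List (List String) :=
  g.set y ((g.getD y []).set x v)

def create_spawn_points_alt (grid : List (List String)) : List (List String) :=
  let h := grid.length
  let w := if 0 < h then (grid.headD []).length else 0
  (List.range h).foldl (fun g y =>
    (List.range w).foldl (fun g x =>
      if (y = 0 ∨ y = h - 1 ∨ x = 0 ∨ x = w - 1) ∧ pvCell g y x = " " then pvPut g y x "S" else g) g) grid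

-- ===== PRECONDITION & SPEC =====
-- Pre_ is exactly where the Python A returns: either the grid is empty, or every row is at least as long
-- as row 0 (every index A uses is then in range), or row 0 is empty and A's side loop indexes no row
-- (height ≤ 2) or only nonempty middle rows (grid[y][0] / grid[y][-1] then resolve); otherwise A raises
-- IndexError.
def Pre_create_spawn_points (grid : List (List String)) : Prop :=
  grid = [] ∨
  (0 < (grid.headD []).length ∧ ∀ row ∈ grid, (grid.headD []).length ≤ row.length) ∨
  ((grid.headD []).length = 0 ∧ (grid.length ≤ 2 ∨ ∀ row ∈ (grid.drop 1).dropLast, row ≠ []))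
instance (grid : List (List String)) : Decidable (Pre_create_spawn_points grid) := by
  unfold Pre_create_spawn_points; infer_instance

def pvWitness_create_spawn_points : List (List String) := [[" ", "#"], ["#", " "]]

-- On grids whose first row is empty but that have ≥ 3 rows, A's side loop still runs and, through grid[y][0]
-- and Python's negative index grid[y][-1], turns ' ' cells at either end of a nonempty middle row into 'S'
-- although the grid's declared width is 0; B reads width 0 as "nothing to mark" and returns the grid
-- unchanged, which is the intended meaning of width.
def D_create_spawn_points (grid : List (List String)) : Prop :=
  (grid.headD []).length = 0 ∧ 3 ≤ grid.length ∧
  ∃ row ∈ (grid.drop 1).dropLast, row.headD "" = " " ∨ row.getLastD "" = " "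
instance (grid : List (List String)) : Decidable (D_create_spawn_points grid) := by
  unfold D_create_spawn_points; infer_instance

def Spec_create_spawn_points (grid : List (List String)) (out : List (List String)) : Prop :=
  ¬ D_create_spawn_points grid → out = create_spawn_points_alt grid
instance (grid : List (List String)) (out : List (List String)) : Decidable (Spec_create_spawn_points grid out) := by
  unfold Spec_create_spawn_points; infer_instance

def pvDiffWitness_create_spawn_points : List (List String) := [[], [" "], []]
def pvDiffWitnessOut_create_spawn_points : (List (List String)) × (List (List String)) :=
  ([[], ["S"], []], [[], [" "], []])

-- ===== CLAIM (what is proved, stated in full; the proofs are below) =====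
def Claim_unchanged_create_spawn_points : Prop := ∀ (grid : List (List String)), Dom_create_spawn_points grid → Pre_create_spawn_points grid → Spec_create_spawn_points grid (create_spawn_points grid)
def Claim_changed_create_spawn_points : Prop := Dom_create_spawn_points (pvDiffWitness_create_spawn_points) ∧ Pre_create_spawn_points (pvDiffWitness_create_spawn_points) ∧ D_create_spawn_points (pvDiffWitness_create_spawn_points) ∧ create_spawn_points (pvDiffWitness_create_spawn_points) = pvDiffWitnessOut_create_spawn_points.1 ∧ create_spawn_points_alt (pvDiffWitness_create_spawn_points) = pvDiffWitnessOut_create_spawn_points.2 ∧ pvDiffWitnessOut_create_spawn_points.1 ≠ pvDiffWitnessOut_create_spawn_points.2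
def Claim_exact_create_spawn_points : Prop := ∀ (grid : List (List String)), Dom_create_spawn_points grid → Pre_create_spawn_points grid → D_create_spawn_points grid → create_spawn_points grid ≠ create_spawn_points_alt grid

-- ===== LEMMAS AND PROOFS =====

-- the cell update both programs perform: ' ' becomes 'S', everything else stays
def pvMark (c : String) : String := if c = " " then "S" else c

def pvStep (g : List (List String)) (p : Nat × Nat) : List (List String) :=
  pvPut g p.1 p.2 (pvMark (pvCell g p.1 p.2))

lemma pvSet_getD_self {α : Type} (l : List α) (i : Nat) (d : α) : l.set i (l.getD i d) = l := by
  by_cases h : i < l.length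
  · rw [List.getD_eq_getElem l d h]; exact List.set_getElem_self h
  · exact List.set_eq_of_length_le (by omega)

lemma pvStep_eq (g : List (List String)) (y x : Nat) :
    (if pvCell g y x = " " then pvPut g y x "S" else g) = pvStep g (y, x) := by
  unfold pvStep pvMark
  split_ifs with h
  · simp [h]
  · unfold pvPut pvCell
    conv_lhs => rw [← pvSet_getD_self g y [], ← pvSet_getD_self (g.getD y []) x ""]

lemma pvMark_mark (c : String) : pvMark (pvMark c) = pvMark c := by
  unfold pvMark; split_ifs with h <;> simp_all

lemma pvCell_step (g : List (List String)) (a b y x : Nat) :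
    pvCell (pvStep g (a, b)) y x = if a = y ∧ b = x then pvMark (pvCell g y x) else pvCell g y x := by
  by_cases hay : a = y
  · subst hay
    by_cases hlen : a < g.length
    · by_cases hbx : b = x
      · subst hbx
        by_cases hrow : b < (g[a]'hlen).length
        · simp [pvStep, pvPut, pvCell, List.getD_eq_getElem?_getD, List.getElem?_set, hlen, hrow]
        · have hnone : (g[a]'hlen)[b]? = none := by rw [List.getElem?_eq_none_iff]; omega
          simp [pvStep, pvPut, pvCell, List.getD_eq_getElem?_getD, List.getElem?_set, hlen, hrow,
            hnone, pvMark]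
      · simp [pvStep, pvPut, pvCell, List.getD_eq_getElem?_getD, List.getElem?_set, hlen, hbx]
    · have hnone : g[a]? = none := by rw [List.getElem?_eq_none_iff]; omega
      simp [pvStep, pvPut, pvCell, List.getD_eq_getElem?_getD, List.getElem?_set, hlen, hnone, pvMark]
  · simp [pvStep, pvPut, pvCell, List.getD_eq_getElem?_getD, List.getElem?_set, hay]

lemma pvCell_foldl (ps : List (Nat × Nat)) (g : List (List String)) (y x : Nat) :
    pvCell (ps.foldl pvStep g) y x =
      if (y, x) ∈ ps then pvMark (pvCell g y x) else pvCell g y x := by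
  induction ps generalizing g with
  | nil => simp
  | cons p t ih =>
    obtain ⟨a, b⟩ := p
    simp only [List.foldl_cons, ih, pvCell_step, List.mem_cons]
    by_cases ht : (y, x) ∈ t <;> by_cases hp : a = y ∧ b = x <;>
      simp [ht, hp, pvMark_mark, Prod.ext_iff] <;> tauto

lemma pvLen_step (g : List (List String)) (p : Nat × Nat) : (pvStep g p).length = g.length := by
  simp [pvStep, pvPut]

lemma pvLen_foldl (ps : List (Nat × Nat)) (g : List (List String)) :
    (ps.foldl pvStep g).length = g.length := by
  induction ps generalizing g with
  | nil => rfl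
  | cons p t ih => rw [List.foldl_cons, ih, pvLen_step]

lemma pvRowLen_step (g : List (List String)) (p : Nat × Nat) (y : Nat) :
    ((pvStep g p).getD y []).length = (g.getD y []).length := by
  obtain ⟨a, b⟩ := p
  simp only [pvStep, pvPut, List.getD_eq_getElem?_getD, List.getElem?_set]
  by_cases hay : a = y
  · subst hay
    by_cases hlen : a < g.length
    · rw [if_pos rfl, if_pos hlen, Option.getD_some, List.length_set]
    · rw [if_pos rfl, if_neg hlen]
      have hnone : g[a]? = none := by rw [List.getElem?_eq_none_iff]; omega
      rw [hnone]
  · rw [if_neg hay]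

lemma pvRowLen_foldl (ps : List (Nat × Nat)) (g : List (List String)) (y : Nat) :
    ((ps.foldl pvStep g).getD y []).length = (g.getD y []).length := by
  induction ps generalizing g with
  | nil => rfl
  | cons p t ih => rw [List.foldl_cons, ih, pvRowLen_step]

-- the positions A touches, as Nat pairs (grid nonempty, row 0 nonempty)
def psA (h w : Nat) : List (Nat × Nat) :=
  (List.range w).flatMap (fun x => [(0, x), (h - 1, x)]) ++
  (List.range (h - 2)).flatMap (fun k => [(1 + k, 0), (1 + k, w - 1)])

-- the positions B touches
def psB (h w : Nat) : List (Nat × Nat) :=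
  (List.range h).flatMap (fun y =>
    ((List.range w).filter (fun x => decide (y = 0 ∨ y = h - 1 ∨ x = 0 ∨ x = w - 1))).map (fun x => (y, x)))

lemma pvMem_psA (h w y x : Nat) :
    (y, x) ∈ psA h w ↔ (x < w ∧ (y = 0 ∨ y = h - 1)) ∨ (1 ≤ y ∧ y ≤ h - 2 ∧ (x = 0 ∨ x = w - 1)) := by
  simp only [psA, List.mem_append, List.mem_flatMap, List.mem_range, List.mem_cons,
    List.not_mem_nil, or_false, Prod.mk.injEq]
  constructor
  · rintro (⟨a, ha, h1 | h1⟩ | ⟨k, hk, h1 | h1⟩) <;> omega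
  · rintro (⟨hx, h0 | h0⟩ | ⟨h1, h2, h0 | h0⟩)
    · exact Or.inl ⟨x, hx, Or.inl ⟨h0, rfl⟩⟩
    · exact Or.inl ⟨x, hx, Or.inr ⟨h0, rfl⟩⟩
    · exact Or.inr ⟨y - 1, by omega, Or.inl ⟨by omega, h0⟩⟩
    · exact Or.inr ⟨y - 1, by omega, Or.inr ⟨by omega, h0⟩⟩

lemma pvMem_psB (h w y x : Nat) :
    (y, x) ∈ psB h w ↔ y < h ∧ x < w ∧ (y = 0 ∨ y = h - 1 ∨ x = 0 ∨ x = w - 1) := by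
  simp only [psB, List.mem_flatMap, List.mem_range, List.mem_map, List.mem_filter,
    decide_eq_true_eq, Prod.mk.injEq]
  constructor
  · rintro ⟨a, ha, b, ⟨hb, hc⟩, h1, h2⟩
    subst h1; subst h2; exact ⟨ha, hb, hc⟩
  · rintro ⟨h1, h2, h3⟩; exact ⟨y, h1, x, ⟨h2, h3⟩, rfl, rfl⟩

lemma pvMem_equiv (h w y x : Nat) (hcase : h = 0 ∨ 0 < w ∨ (w = 0 ∧ h ≤ 2)) (hy : y < h) :
    ((y, x) ∈ psA h w ↔ (y, x) ∈ psB h w) := by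
  rw [pvMem_psA, pvMem_psB]; omega

-- generic loop-shape lemmas
lemma pvFoldl_ite_filter {α γ : Type} (l : List α) (p : α → Prop) [DecidablePred p]
    (f : γ → α → γ) (c : γ) :
    l.foldl (fun g a => if p a then f g a else g) c =
      (l.filter (fun a => decide (p a))).foldl f c := by
  induction l generalizing c with
  | nil => rfl
  | cons a t ih => by_cases h : p a <;> simp [h, ih]

lemma pvFoldl_fixed {α γ : Type} (l : List α) (f : γ → α → γ) (c : γ)
    (h : ∀ a ∈ l, f c a = c) : l.foldl f c = c := by
  induction l with
  | nil => rfl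
  | cons a t ih =>
    rw [List.foldl_cons, h a (by simp)]
    exact ih fun a ha => h a (by simp [ha])

-- bridging A's Int indexing to Nat indexing
lemma pvGetA_cast (g : List (List String)) (y x : Nat) : pvGetA g (y : Int) (x : Int) = pvCell g y x := by
  simp [pvGetA, pvCell]

lemma pvSetA_cast (g : List (List String)) (y x : Nat) (v : String) :
    pvSetA g (y : Int) (x : Int) v = pvPut g y x v := by
  simp [pvSetA, pvPut]

lemma pvGetA_zero_cast (g : List (List String)) (x : Nat) : pvGetA g 0 (x : Int) = pvCell g 0 x := by
  simpa using pvGetA_cast g 0 x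

lemma pvSetA_zero_cast (g : List (List String)) (x : Nat) (v : String) :
    pvSetA g 0 (x : Int) v = pvPut g 0 x v := by
  simpa using pvSetA_cast g 0 x v

lemma pvGetA_cast_zero (g : List (List String)) (y : Nat) : pvGetA g (y : Int) 0 = pvCell g y 0 := by
  simpa using pvGetA_cast g y 0

lemma pvSetA_cast_zero (g : List (List String)) (y : Nat) (v : String) :
    pvSetA g (y : Int) 0 v = pvPut g y 0 v := by
  simpa using pvSetA_cast g y 0 v

-- A as a fold of pvStep over psA (grid nonempty, row 0 nonempty)
lemma pvA_eq_fold (grid : List (List String)) (hh : 0 < grid.length)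
    (hw : 0 < (grid.headD []).length) :
    create_spawn_points grid = (psA grid.length (grid.headD []).length).foldl pvStep grid := by
  have hcast1 : ((grid.length : Int)) - 1 = ((grid.length - 1 : Nat) : Int) := by omega
  have hcast2 : (((grid.headD []).length : Int)) - 1 = (((grid.headD []).length - 1 : Nat) : Int) := by omega
  have e1 : PySem.List.pyRange 0 ((grid.headD []).length : Int) =
      (List.range (grid.headD []).length).map (fun k : Nat => (k : Int)) := by
    rw [PySem.List.pyRange_one]
    simp only [Int.sub_zero, Int.toNat_natCast, zero_add]
  have e2 : PySem.List.pyRange 1 ((grid.length : Int) - 1) =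
      (List.range (grid.length - 2)).map (fun k => ((1 + k : Nat) : Int)) := by
    rw [PySem.List.pyRange_one]
    have h1 : ((grid.length : Int) - 1 - 1).toNat = grid.length - 2 := by omega
    rw [h1]
    congr 1
  unfold create_spawn_points
  dsimp only
  rw [if_pos (by exact_mod_cast hh : ((grid.length : Int)) > 0)]
  rw [e1, e2, List.foldl_map, List.foldl_map]
  unfold psA
  rw [List.foldl_append, List.foldl_flatMap, List.foldl_flatMap]
  simp only [List.foldl_cons, List.foldl_nil]
  congr 1
  · funext g k
    dsimp only
    rw [hcast2]
    simp only [pvGetA_cast_zero, pvSetA_cast_zero, pvGetA_cast, pvSetA_cast]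
    rw [pvStep_eq g (1 + k) 0, pvStep_eq]
  · congr 1
    funext g k
    dsimp only
    rw [hcast1]
    simp only [pvGetA_zero_cast, pvSetA_zero_cast, pvGetA_cast, pvSetA_cast]
    rw [pvStep_eq g 0 k, pvStep_eq]


-- B as a fold of pvStep over psB
lemma pvB_eq_fold (grid : List (List String)) :
    create_spawn_points_alt grid =
      (psB grid.length (if 0 < grid.length then (grid.headD []).length else 0)).foldl pvStep grid := by
  unfold create_spawn_points_alt
  dsimp only
  unfold psB
  rw [List.foldl_flatMap]
  apply PySem.List.foldl_congr_mem
  intro acc y _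
  have f : (fun (g : List (List String)) (x : Nat) =>
      if (y = 0 ∨ y = grid.length - 1 ∨ x = 0 ∨ x = (if 0 < grid.length then (grid.headD []).length else 0) - 1)
          ∧ pvCell g y x = " " then pvPut g y x "S" else g)
      = fun g x => if (y = 0 ∨ y = grid.length - 1 ∨ x = 0 ∨ x = (if 0 < grid.length then (grid.headD []).length else 0) - 1)
          then pvStep g (y, x) else g := by
    funext g x
    by_cases hp : (y = 0 ∨ y = grid.length - 1 ∨ x = 0 ∨ x = (if 0 < grid.length then (grid.headD []).length else 0) - 1)
    · by_cases hq : pvCell g y x = " "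
      · rw [if_pos ⟨hp, hq⟩, if_pos hp, ← pvStep_eq g y x, if_pos hq]
      · rw [if_neg (fun hc => hq hc.2), if_pos hp, ← pvStep_eq g y x, if_neg hq]
    · rw [if_neg (fun hc => hp hc.1), if_neg hp]
  rw [f, pvFoldl_ite_filter, ← List.foldl_map]

lemma pvGetD_zero_headD (l : List String) : l.getD 0 "" = l.headD "" := by
  cases l <;> rfl

lemma pvGetLastD (l : List String) (h : l ≠ []) : l.getLastD "" = l.getLast h := by
  rw [List.getLastD_eq_getLast?, List.getLast?_eq_some_getLast h]; rfl

-- in the width-0 case A performs no update (under Pre_ and outside D_)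
lemma pvA_width0 (grid : List (List String)) (hh : 0 < grid.length)
    (hw0 : (grid.headD []).length = 0)
    (hside : grid.length ≤ 2 ∨ ∀ row ∈ (grid.drop 1).dropLast, row ≠ [])
    (hnD : ¬ D_create_spawn_points grid) :
    create_spawn_points grid = grid := by
  unfold create_spawn_points
  dsimp only
  rw [if_pos (by exact_mod_cast hh : ((grid.length : Int)) > 0), hw0]
  rw [PySem.List.pyRange_one_eq_nil (by simp), List.foldl_nil]
  apply pvFoldl_fixed
  intro y hy
  rw [PySem.List.mem_pyRange_one] at hy
  obtain ⟨m, rfl⟩ : ∃ m : Nat, y = (m : Int) := ⟨y.toNat, by omega⟩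
  have h3 : 3 ≤ grid.length := by omega
  have hmid : ∀ row ∈ (grid.drop 1).dropLast, row ≠ [] := by
    rcases hside with h | h
    · omega
    · exact h
  have hnosp : ∀ row ∈ (grid.drop 1).dropLast, ¬(row.headD "" = " " ∨ row.getLastD "" = " ") := by
    intro row hr hcon
    exact hnD ⟨hw0, h3, row, hr, hcon⟩
  have hm1 : 1 ≤ m := by omega
  have hmh : m < grid.length - 1 := by omega
  -- the row A touches is a middle row
  have hmlen : m - 1 < ((grid.drop 1).dropLast).length := by
    rw [List.length_dropLast, List.length_drop]; omega
  have hrow_eq : ((grid.drop 1).dropLast)[m - 1]'hmlen = grid.getD m [] := by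
    rw [List.getElem_dropLast, List.getElem_drop]
    rw [List.getD_eq_getElem grid [] (by omega)]
    congr 1
    omega
  have hrow_mem : grid.getD m [] ∈ (grid.drop 1).dropLast := by
    rw [← hrow_eq]; exact List.getElem_mem hmlen
  have hne : grid.getD m [] ≠ [] := hmid _ hrow_mem
  have hns : ¬(grid.getD m []).headD "" = " " ∧ ¬(grid.getD m []).getLastD "" = " " :=
    ⟨fun h => hnosp _ hrow_mem (Or.inl h), fun h => hnosp _ hrow_mem (Or.inr h)⟩
  have hget0 : pvGetA grid (m : Int) 0 = (grid.getD m []).headD "" := by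
    rw [pvGetA_cast_zero]
    unfold pvCell
    exact pvGetD_zero_headD _
  have hgetlast : pvGetA grid (m : Int) (((0 : Nat) : Int) - 1) = (grid.getD m []).getLastD "" := by
    unfold pvGetA
    rw [PySem.List.pyGetD_natCast]
    have hneg : (((0 : Nat) : Int)) - 1 = -1 := by norm_num
    rw [hneg, PySem.List.pyGetD_neg_one _ _ hne, pvGetLastD _ hne]
  rw [hget0, if_neg hns.1, hgetlast, if_neg hns.2]

lemma pvCell_eq_getElem (g : List (List String)) (y x : Nat) (h1 : y < g.length)
    (h2 : x < (g[y]'h1).length) : pvCell g y x = (g[y]'h1)[x]'h2 := by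
  unfold pvCell
  rw [List.getD_eq_getElem g [] h1, List.getD_eq_getElem _ "" h2]

-- B does nothing on a width-0 grid
lemma pvB_width0 (grid : List (List String)) (hh : 0 < grid.length)
    (hw0 : (grid.headD []).length = 0) : create_spawn_points_alt grid = grid := by
  have hps : psB grid.length 0 = [] := by
    have hfm : ∀ l : List Nat, l.flatMap (fun _ => ([] : List (Nat × Nat))) = [] := by
      intro l; induction l with
      | nil => rfl
      | cons a t ih => simp [ih]
    simp only [psB, List.range_zero, List.filter_nil, List.map_nil]
    exact hfm _
  rw [pvB_eq_fold, if_pos hh, hw0, hps]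
  rfl

-- A's side loop as a fold over pvSideBody in the width-0 case
def pvSideBody (g : List (List String)) (y : Int) : List (List String) :=
  let g' := if pvGetA g y 0 = " " then pvSetA g y 0 "S" else g
  if pvGetA g' y (((0 : Nat) : Int) - 1) = " " then pvSetA g' y (((0 : Nat) : Int) - 1) "S" else g'

lemma pvA_w0_fold (grid : List (List String)) (hh : 0 < grid.length)
    (hw0 : (grid.headD []).length = 0) :
    create_spawn_points grid = (PySem.List.pyRange 1 ((grid.length : Int) - 1)).foldl pvSideBody grid := by
  unfold create_spawn_points pvSideBody
  dsimp only
  rw [if_pos (by exact_mod_cast hh : ((grid.length : Int)) > 0), hw0]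
  rw [PySem.List.pyRange_one_eq_nil (by simp), List.foldl_nil]

lemma pvSet_getD_ne (g : List (List String)) (n m : Nat) (r : List String) (h : n ≠ m) :
    (g.set n r).getD m [] = g.getD m [] := by
  simp [List.getD_eq_getElem?_getD, List.getElem?_set, h]

lemma pvSet_getD_self2 (g : List (List String)) (n : Nat) (r : List String) (h : n < g.length) :
    (g.set n r).getD n [] = r := by
  simp [List.getD_eq_getElem?_getD, List.getElem?_set, h]

lemma pvSideBody_getD_ne (g : List (List String)) (y : Int) (m : Nat) (hy : 0 ≤ y)
    (hne : y ≠ (m : Int)) : (pvSideBody g y).getD m [] = g.getD m [] := by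
  have hnn : y.toNat ≠ m := by omega
  unfold pvSideBody pvSetA
  dsimp only
  split_ifs <;>
    simp [PySem.List.pySetD_of_nonneg, hy, pvSet_getD_ne, hnn]

lemma pvSideBody_length (g : List (List String)) (y : Int) :
    (pvSideBody g y).length = g.length := by
  unfold pvSideBody pvSetA
  dsimp only
  split_ifs <;> simp [PySem.List.length_pySetD]

lemma pvFold_sideBody_getD (l : List Int) (g : List (List String)) (m : Nat)
    (hl : ∀ y ∈ l, 0 ≤ y ∧ y ≠ (m : Int)) :
    (l.foldl pvSideBody g).getD m [] = g.getD m [] := by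
  induction l generalizing g with
  | nil => rfl
  | cons a t ih =>
    rw [List.foldl_cons, ih _ (fun y hy => hl y (by simp [hy]))]
    exact pvSideBody_getD_ne _ _ _ (hl a (by simp)).1 (hl a (by simp)).2

lemma pvFold_sideBody_length (l : List Int) (g : List (List String)) :
    (l.foldl pvSideBody g).length = g.length := by
  induction l generalizing g with
  | nil => rfl
  | cons a t ih => rw [List.foldl_cons, ih, pvSideBody_length]

lemma pvSetD_neg_one (xs : List String) (h : xs ≠ []) (v : String) :
    PySem.List.pySetD xs (-1) v = xs.set (xs.length - 1) v := by
  have hn : 0 < xs.length := List.length_pos_iff.mpr h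
  unfold PySem.List.pySetD PySem.List.pySet? PySem.List.pyIdx?
  rw [if_neg (by omega), if_pos (by omega : -((xs.length : Nat) : Int) ≤ -1)]
  norm_num

lemma pvGetA_row0 (g : List (List String)) (m : Nat) :
    pvGetA g (m : Int) 0 = (g.getD m []).headD "" := by
  rw [pvGetA_cast_zero]
  unfold pvCell
  exact pvGetD_zero_headD _

lemma pvGetA_rowlast (g : List (List String)) (m : Nat) (h : g.getD m [] ≠ []) :
    pvGetA g (m : Int) (((0 : Nat) : Int) - 1) = (g.getD m []).getLastD "" := by
  unfold pvGetA
  rw [PySem.List.pyGetD_natCast]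
  have hneg : (((0 : Nat) : Int)) - 1 = -1 := by norm_num
  rw [hneg, PySem.List.pyGetD_neg_one _ _ h, pvGetLastD _ h]

lemma pvHeadD_set_zero (l : List String) (h : l ≠ []) : (l.set 0 "S").headD "" = "S" := by
  cases l with
  | nil => exact absurd rfl h
  | cons a t => rfl

lemma pvHeadD_set_S (l : List String) (j : Nat) (h : l.headD "" = "S") :
    (l.set j "S").headD "" = "S" := by
  cases l with
  | nil => simpa using h
  | cons a t =>
    cases j with
    | zero => rfl
    | succ n => simpa using h

lemma pvLastD_set_last (l : List String) (h : l ≠ []) :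
    (l.set (l.length - 1) "S").getLastD "" = "S" := by
  have h2 : l.set (l.length - 1) "S" ≠ [] :=
    List.ne_nil_of_length_pos (by rw [List.length_set]; exact List.length_pos_iff.mpr h)
  rw [pvGetLastD _ h2, List.getLast_eq_getElem]
  simp [List.getElem_set, List.length_set]

lemma pvSetA_row (g : List (List String)) (m : Nat) (x : Int) (v : String) :
    pvSetA g (m : Int) x v = g.set m (PySem.List.pySetD (g.getD m []) x v) := by
  unfold pvSetA
  rw [PySem.List.pyGetD_natCast, PySem.List.pySetD_natCast]

-- applying A's side body to its own (nonempty) row with a ' ' at either end changes the row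
lemma pvSideBody_self_ne (g : List (List String)) (m : Nat) (hm : m < g.length)
    (hne : g.getD m [] ≠ [])
    (hsp : (g.getD m []).headD "" = " " ∨ (g.getD m []).getLastD "" = " ") :
    (pvSideBody g (m : Int)).getD m [] ≠ g.getD m [] := by
  have hzero : ((0 : Int)) ≤ 0 := le_refl 0
  by_cases hhd : (g.getD m []).headD "" = " "
  · -- the first sub-step marks the head
    have hset0 : PySem.List.pySetD (g.getD m []) 0 "S" = (g.getD m []).set 0 "S" := by
      rw [PySem.List.pySetD_of_nonneg _ _ hzero]
      norm_num
    have hg' : (if pvGetA g (m : Int) 0 = " " then pvSetA g (m : Int) 0 "S" else g)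
        = g.set m ((g.getD m []).set 0 "S") := by
      rw [pvGetA_row0, if_pos hhd, pvSetA_row, hset0]
    have hr1ne : (g.getD m []).set 0 "S" ≠ [] :=
      List.ne_nil_of_length_pos (by rw [List.length_set]; exact List.length_pos_iff.mpr hne)
    have hr1hd : ((g.getD m []).set 0 "S").headD "" = "S" := pvHeadD_set_zero _ hne
    have hGrow : (g.set m ((g.getD m []).set 0 "S")).getD m [] = (g.getD m []).set 0 "S" :=
      pvSet_getD_self2 _ _ _ hm
    unfold pvSideBody
    dsimp only
    rw [hg']
    intro hc
    have hres : ((" " : String)) = "S" := by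
      rw [← hhd]
      conv_lhs => rw [← hc]
      split_ifs with h2
      · rw [pvSetA_row, pvSet_getD_self2 _ _ _ (by rwa [List.length_set]), hGrow]
        have hidx : (((0 : Nat) : Int)) - 1 = -1 := by norm_num
        rw [hidx, pvSetD_neg_one _ hr1ne, pvHeadD_set_S _ _ hr1hd]
      · rw [hGrow, hr1hd]
    exact absurd hres (by decide)
  · have hlast : (g.getD m []).getLastD "" = " " := hsp.resolve_left hhd
    have hg' : (if pvGetA g (m : Int) 0 = " " then pvSetA g (m : Int) 0 "S" else g) = g := by
      rw [pvGetA_row0, if_neg hhd]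
    unfold pvSideBody
    dsimp only
    rw [hg']
    rw [pvGetA_rowlast _ _ hne, if_pos hlast]
    have hidx : (((0 : Nat) : Int)) - 1 = -1 := by norm_num
    rw [pvSetA_row, hidx, pvSetD_neg_one _ hne, pvSet_getD_self2 _ _ _ hm]
    intro hc
    have hres : ((" " : String)) = "S" := by
      rw [← hlast]
      conv_lhs => rw [← hc]
      exact pvLastD_set_last _ hne
    exact absurd hres (by decide)

-- ===== VERDICT (by name: the statement is the Claim_ definition above) =====
theorem create_spawn_points_spec : Claim_unchanged_create_spawn_points := by
  intro grid _hdom hpre hnD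
  show create_spawn_points grid = create_spawn_points_alt grid
  by_cases hnil : grid = []
  · subst hnil; decide
  · have hh : 0 < grid.length := List.length_pos_iff.mpr hnil
    rcases hpre with h0 | ⟨hw, _hrows⟩ | ⟨hw0, hside⟩
    · exact absurd h0 hnil
    · rw [pvA_eq_fold grid hh hw, pvB_eq_fold grid, if_pos hh]
      apply List.ext_getElem (by rw [pvLen_foldl, pvLen_foldl])
      intro y hy1 hy2
      have hyg : y < grid.length := by rwa [pvLen_foldl] at hy1
      apply List.ext_getElem
      · rw [← List.getD_eq_getElem _ [] hy1, ← List.getD_eq_getElem _ [] hy2,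
          pvRowLen_foldl, pvRowLen_foldl]
      · intro x hx1 hx2
        rw [← pvCell_eq_getElem _ _ _ hy1 hx1, ← pvCell_eq_getElem _ _ _ hy2 hx2]
        rw [pvCell_foldl, pvCell_foldl]
        have hiff := pvMem_equiv grid.length (grid.headD []).length y x (Or.inr (Or.inl hw)) hyg
        by_cases hm : (y, x) ∈ psA grid.length (grid.headD []).length
        · rw [if_pos hm, if_pos (hiff.mp hm)]
        · rw [if_neg hm, if_neg (fun hc => hm (hiff.mpr hc))]
    · rw [pvA_width0 grid hh hw0 hside hnD, pvB_width0 grid hh hw0]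

theorem create_spawn_points_changed : Claim_changed_create_spawn_points := by
  unfold Claim_changed_create_spawn_points; decide

theorem create_spawn_points_tight : Claim_exact_create_spawn_points := by
  intro grid _hdom hpre hD
  obtain ⟨hw0, h3, row, hrowmem, hsp⟩ := hD
  have hh : 0 < grid.length := by omega
  have hmid : ∀ r ∈ (grid.drop 1).dropLast, r ≠ [] := by
    rcases hpre with h0 | ⟨hw, _⟩ | ⟨_, hside⟩
    · rw [h0] at h3; simp at h3
    · omega
    · rcases hside with h | h
      · omega
      · exact h
  have hrowne : row ≠ [] := hmid row hrowmem
  rw [pvB_width0 grid hh hw0, pvA_w0_fold grid hh hw0]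
  have hmidlen : ((grid.drop 1).dropLast).length = grid.length - 2 := by
    rw [List.length_dropLast, List.length_drop]
    omega
  obtain ⟨j, hjlt, hjeq⟩ := List.mem_iff_getElem.mp hrowmem
  have hjlt2 : j < grid.length - 2 := by omega
  have hrow_eq : grid.getD (1 + j) [] = row := by
    rw [← hjeq, List.getElem_dropLast, List.getElem_drop,
      List.getD_eq_getElem grid [] (by omega)]
  have hmem : ((1 + j : Nat) : Int) ∈ PySem.List.pyRange 1 ((grid.length : Int) - 1) :=
    PySem.List.mem_pyRange_one.mpr ⟨by omega, by omega⟩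
  obtain ⟨s, t, hst⟩ := List.mem_iff_append.mp hmem
  have hnd := PySem.List.nodup_pyRange_one 1 ((grid.length : Int) - 1)
  rw [hst] at hnd
  rw [List.nodup_append, List.nodup_cons] at hnd
  have hnotm_s : ((1 + j : Nat) : Int) ∉ s := fun hs => (hnd.2.2 _ hs _ (List.mem_cons_self)) rfl
  have hnotm_t : ((1 + j : Nat) : Int) ∉ t := hnd.2.1.1
  have hsub : ∀ y ∈ s ++ ((1 + j : Nat) : Int) :: t, 1 ≤ y ∧ y < (grid.length : Int) - 1 := by
    intro y hy
    rw [← hst] at hy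
    exact PySem.List.mem_pyRange_one.mp hy
  intro hc
  have hgd := congrArg (fun g0 => g0.getD (1 + j) []) hc
  dsimp only at hgd
  rw [hst, List.foldl_append, List.foldl_cons] at hgd
  have hgs_row : (s.foldl pvSideBody grid).getD (1 + j) [] = grid.getD (1 + j) [] :=
    pvFold_sideBody_getD s grid (1 + j) (fun y hy =>
      ⟨by have := hsub y (by simp [hy]); omega, fun hcy => hnotm_s (hcy ▸ hy)⟩)
  have hgs_len : (s.foldl pvSideBody grid).length = grid.length := pvFold_sideBody_length s grid
  have htail : (t.foldl pvSideBody (pvSideBody (s.foldl pvSideBody grid) ((1 + j : Nat) : Int))).getD (1 + j) []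
      = (pvSideBody (s.foldl pvSideBody grid) ((1 + j : Nat) : Int)).getD (1 + j) [] :=
    pvFold_sideBody_getD t _ (1 + j) (fun y hy =>
      ⟨by have := hsub y (by simp [hy]); omega, fun hcy => hnotm_t (hcy ▸ hy)⟩)
  rw [htail] at hgd
  have hchg := pvSideBody_self_ne (s.foldl pvSideBody grid) (1 + j) (by omega)
    (by rw [hgs_row, hrow_eq]; exact hrowne)
    (by rw [hgs_row, hrow_eq]; exact hsp)
  exact hchg (by rw [hgd, ← hgs_row])
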